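-- pv_equiv track=rewrite | github.com/Draax17/Algoritmo-de-la-primaria | algoritmo_primaria.py | multiplicar_digito_por_lista
-- ===== SOURCE A (Python) =====
-- def multiplicar_digito_por_lista(digito, lista_numero, posicion):
--     """
--     Multiplica un dígito por un número representado como lista.
--
--     Args:
--         digito (int): Dígito a multiplicar (0-9)
--         lista_numero (list): Número como lista de dígitos
--         posicion (int): Posición para agregar ceros al final
--
--     Returns:
--         list: Resultado de la multiplicación como lista de dígitos
--     """
--     if digito == 0:
--         return [0]
--
--     resultado = []
--     carry = 0
--
--     # Multiplicar de derecha a izquierda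
--     for i in range(len(lista_numero) - 1, -1, -1):
--         producto = digito * lista_numero[i] + carry
--         resultado.insert(0, producto % 10)
--         carry = producto // 10
--
--     # Si queda carry al final
--     if carry > 0:
--         resultado.insert(0, carry)
--
--     # Agregar ceros según la posición
--     resultado.extend([0] * posicion)
--
--     return resultado
-- ===== SOURCE B (Python) =====
-- def multiplicar_digito_por_lista(digito, lista_numero, posicion):
--     """Whole-number arithmetic version: evaluate the digit list as an integer
--     (Horner), multiply once, then re-extract the low len(lista_numero) digits
--     by repeated divmod; any remainder becomes the prepended carry cell."""
--     if digito == 0: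
--         return [0]
--
--     value = 0
--     for d in lista_numero:
--         value = value * 10 + d
--     n = digito * value
--
--     out = []
--     for _ in range(len(lista_numero)):
--         out.append(n % 10)
--         n //= 10
--     out.reverse()
--
--     if n > 0:
--         out.insert(0, n)
--
--     out.extend([0] * posicion)
--     return out
-- ===== Notes on version B (the rewrite author's own statement) =====
-- stated objective: alternative
-- what changed: A does schoolbook per-digit multiplication with fused carry propagation, building the result front-wise with insert(0); B evaluates the digit list as one integer with Horner's rule, multiplies once, and re-extracts the low len(lista) digits by repeated divmod, prepending any remainder as the carry cell.
import Mathlib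
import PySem

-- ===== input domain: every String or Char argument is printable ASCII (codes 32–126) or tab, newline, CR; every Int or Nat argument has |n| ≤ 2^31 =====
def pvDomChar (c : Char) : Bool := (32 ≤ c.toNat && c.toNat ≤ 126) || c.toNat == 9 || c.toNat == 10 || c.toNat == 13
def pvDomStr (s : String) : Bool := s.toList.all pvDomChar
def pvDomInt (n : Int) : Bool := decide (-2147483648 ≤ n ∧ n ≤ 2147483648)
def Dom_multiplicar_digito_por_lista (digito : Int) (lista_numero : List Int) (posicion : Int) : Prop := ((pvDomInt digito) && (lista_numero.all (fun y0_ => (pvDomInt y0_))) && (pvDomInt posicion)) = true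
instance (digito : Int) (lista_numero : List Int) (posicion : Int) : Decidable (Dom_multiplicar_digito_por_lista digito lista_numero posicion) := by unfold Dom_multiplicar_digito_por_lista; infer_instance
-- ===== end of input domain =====

-- B replaces A's per-digit schoolbook multiply-with-carry by whole-number arithmetic: Horner-evaluate the list, multiply once, re-extract the digits (alternative decomposition).


-- ===== PORT A =====
-- for i in range(len-1, -1, -1): producto = digito*lista[i] + carry; resultado.insert(0, producto%10); carry = producto//10
-- (lista_numero[i] is always in range inside the loop, so pyGetD with default 0 is exact)
def multiplicar_digito_por_lista (digito : Int) (lista_numero : List Int) (posicion : Int) : List Int :=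
  if digito = 0 then [0]
  else
    let st := (PySem.List.pyRange ((lista_numero.length : Int) - 1) (-1) (-1)).foldl
      (fun s i =>
        let producto := digito * PySem.List.pyGetD lista_numero i 0 + s.2
        (PySem.Int.mod producto 10 :: s.1, PySem.Int.floordiv producto 10)) ([], 0)
    let resultado := if st.2 > 0 then st.2 :: st.1 else st.1
    resultado ++ List.replicate posicion.toNat 0

-- ===== PORT B =====
-- value = Horner fold; n = digito*value; then 'for _ in range(len)': out.append(n % 10); n //= 10; reverse; carry cell; zeros
def multiplicar_digito_por_lista_alt (digito : Int) (lista_numero : List Int) (posicion : Int) : List Int :=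
  if digito = 0 then [0]
  else
    let value := lista_numero.foldl (fun v d => v * 10 + d) 0
    let st := (List.range lista_numero.length).foldl
      (fun s _ => (s.1 ++ [PySem.Int.mod s.2 10], PySem.Int.floordiv s.2 10))
      ([], digito * value)
    let out := st.1.reverse
    (if st.2 > 0 then st.2 :: out else out) ++ List.replicate posicion.toNat 0

-- ===== PRECONDITION & SPEC =====
def Spec_multiplicar_digito_por_lista (digito : Int) (lista_numero : List Int) (posicion : Int) (out : List Int) : Prop := out = multiplicar_digito_por_lista_alt digito lista_numero posicion
instance (digito : Int) (lista_numero : List Int) (posicion : Int) (out : List Int) : Decidable (Spec_multiplicar_digito_por_lista digito lista_numero posicion out) := by unfold Spec_multiplicar_digito_por_lista; infer_instance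

-- ===== CLAIM (what is proved, stated in full; the proofs are below) =====
def Claim_equal_multiplicar_digito_por_lista : Prop := ∀ (digito : Int) (lista_numero : List Int) (posicion : Int), Dom_multiplicar_digito_por_lista digito lista_numero posicion → Spec_multiplicar_digito_por_lista digito lista_numero posicion (multiplicar_digito_por_lista digito lista_numero posicion)

-- ===== LEMMAS AND PROOFS =====

-- k low base-10 digits of N (most-significant of the k first), and what is left above them
def pvDigitsRev : Int → Nat → List Int
  | _, 0 => []
  | N, k+1 => PySem.Int.mod N 10 :: pvDigitsRev (PySem.Int.floordiv N 10) k

def pvRem : Int → Nat → Int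
  | N, 0 => N
  | N, k+1 => pvRem (PySem.Int.floordiv N 10) k

theorem pvRem_succ' : ∀ (k : Nat) (N : Int), pvRem N (k+1) = PySem.Int.floordiv (pvRem N k) 10 := by
  intro k
  induction k with
  | zero => intro N; rfl
  | succ k ih => intro N; show pvRem (PySem.Int.floordiv N 10) (k+1) = _; rw [ih]; rfl

theorem pvDigitsRev_succ' : ∀ (k : Nat) (N : Int),
    pvDigitsRev N (k+1) = pvDigitsRev N k ++ [PySem.Int.mod (pvRem N k) 10] := by
  intro k
  induction k with
  | zero => intro N; rfl
  | succ k ih =>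
    intro N
    show PySem.Int.mod N 10 :: pvDigitsRev (PySem.Int.floordiv N 10) (k+1) = _
    rw [ih]
    rfl

-- shifting by a multiple of 10^k does not change the k low digits, and adds to the remainder
theorem pvShift : ∀ (k : Nat) (N a : Int),
    pvRem (a * 10 ^ k + N) k = a + pvRem N k ∧
    pvDigitsRev (a * 10 ^ k + N) k = pvDigitsRev N k := by
  intro k
  induction k with
  | zero => intro N a; constructor <;> simp [pvRem, pvDigitsRev]
  | succ k ih =>
    intro N a
    have hdiv : PySem.Int.floordiv (a * 10 ^ (k+1) + N) 10 = a * 10 ^ k + PySem.Int.floordiv N 10 := by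
      rw [PySem.Int.floordiv_eq_ediv_of_pos (by norm_num),
          PySem.Int.floordiv_eq_ediv_of_pos (by norm_num)]
      have : a * 10 ^ (k+1) + N = N + (a * 10 ^ k) * 10 := by ring
      rw [this, Int.add_mul_ediv_right _ _ (by norm_num)]
      ring
    have hmod : PySem.Int.mod (a * 10 ^ (k+1) + N) 10 = PySem.Int.mod N 10 := by
      rw [PySem.Int.mod_eq_emod_of_pos (by norm_num),
          PySem.Int.mod_eq_emod_of_pos (by norm_num)]
      have : a * 10 ^ (k+1) + N = N + (a * 10 ^ k) * 10 := by ring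
      rw [this]; omega
    constructor
    · show pvRem (PySem.Int.floordiv (a * 10 ^ (k+1) + N) 10) k = _
      rw [hdiv, (ih (PySem.Int.floordiv N 10) a).1]
      rfl
    · show PySem.Int.mod (a * 10 ^ (k+1) + N) 10
          :: pvDigitsRev (PySem.Int.floordiv (a * 10 ^ (k+1) + N) 10) k = _
      rw [hmod, hdiv, (ih (PySem.Int.floordiv N 10) a).2]
      rfl

-- Horner with an arbitrary seed
theorem pvHorner : ∀ (l : List Int) (v : Int),
    l.foldl (fun v d => v * 10 + d) v = v * 10 ^ l.length + l.foldl (fun v d => v * 10 + d) 0 := by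
  intro l
  induction l with
  | nil => intro v; simp
  | cons d t ih =>
    intro v
    simp only [List.foldl_cons, List.length_cons]
    rw [ih (v * 10 + d), ih (0 * 10 + d)]
    ring

-- A's index countdown loop equals a foldr over the list itself.
theorem pv_loop_eq_foldr {α : Type} (G : Int → α → α) :
    ∀ (l : List Int) (init : α),
      (PySem.List.pyRange ((l.length : Int) - 1) (-1) (-1)).foldl
        (fun s i => G (PySem.List.pyGetD l i 0) s) init
      = l.foldr G init := by
  intro l
  induction l using List.reverseRecOn with
  | nil =>
    intro init
    rw [PySem.List.pyRange_neg_one_eq_nil (by simp)]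
    rfl
  | append_singleton l x ih =>
    intro init
    have hlen : ((l ++ [x]).length : Int) - 1 = (l.length : Int) := by simp
    rw [hlen, PySem.List.pyRange_neg_one_cons (by omega)]
    simp only [List.foldl_cons]
    have hx : PySem.List.pyGetD (l ++ [x]) (l.length : Int) 0 = x := by
      rw [PySem.List.pyGetD_natCast]; simp [List.getD]
    rw [hx]
    have hcongr :
        (PySem.List.pyRange ((l.length : Int) - 1) (-1) (-1)).foldl
          (fun s i => G (PySem.List.pyGetD (l ++ [x]) i 0) s) (G x init)
        = (PySem.List.pyRange ((l.length : Int) - 1) (-1) (-1)).foldl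
          (fun s i => G (PySem.List.pyGetD l i 0) s) (G x init) := by
      apply PySem.List.foldl_congr_mem
      intro acc i hi
      rw [PySem.List.mem_pyRange_neg_one] at hi
      have h0 : 0 ≤ i := by omega
      obtain ⟨k, rfl⟩ := Int.eq_ofNat_of_zero_le h0
      have hk : k < l.length := by exact_mod_cast Int.lt_of_le_sub_one hi.2
      rw [PySem.List.pyGetD_natCast, PySem.List.pyGetD_natCast]
      simp [List.getD, List.getElem?_append_left hk]
    rw [hcongr, ih (G x init)]
    simp

-- A's fused multiply-and-carry foldr computes the digit extraction of digito * (Horner value)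
theorem pvA_foldr (digito : Int) : ∀ (l : List Int),
    l.foldr (fun d s => (PySem.Int.mod (digito * d + s.2) 10 :: s.1,
                         PySem.Int.floordiv (digito * d + s.2) 10)) ([], 0)
    = ((pvDigitsRev (digito * l.foldl (fun v d => v * 10 + d) 0) l.length).reverse,
       pvRem (digito * l.foldl (fun v d => v * 10 + d) 0) l.length) := by
  intro l
  induction l with
  | nil => simp [pvDigitsRev, pvRem]
  | cons d t ih =>
    have hval : (d :: t).foldl (fun v d => v * 10 + d) 0
        = d * 10 ^ t.length + t.foldl (fun v d => v * 10 + d) 0 := by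
      simp only [List.foldl_cons]
      rw [pvHorner t (0 * 10 + d)]
      ring_nf
    have hN : digito * (d :: t).foldl (fun v d => v * 10 + d) 0
        = (digito * d) * 10 ^ t.length + digito * t.foldl (fun v d => v * 10 + d) 0 := by
      rw [hval]; ring
    simp only [List.foldr_cons, ih]
    have hsh := pvShift t.length (digito * t.foldl (fun v d => v * 10 + d) 0) (digito * d)
    rw [List.length_cons, hN, pvDigitsRev_succ', pvRem_succ', hsh.1, hsh.2]
    simp

-- B's extraction loop over range n builds the reversed digit list and the remainder
theorem pvB_loop (N : Int) : ∀ (n : Nat),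
    (List.range n).foldl
      (fun s (_ : Nat) => (s.1 ++ [PySem.Int.mod s.2 10], PySem.Int.floordiv s.2 10)) ([], N)
    = (pvDigitsRev N n, pvRem N n) := by
  intro n
  induction n with
  | zero => rfl
  | succ n ih =>
    rw [List.range_succ, List.foldl_append, ih]
    simp only [List.foldl_cons, List.foldl_nil]
    rw [pvDigitsRev_succ', pvRem_succ']

-- ===== VERDICT (by name: the statement is the Claim_ definition above) =====
theorem multiplicar_digito_por_lista_spec : Claim_equal_multiplicar_digito_por_lista := by
  intro digito lista posicion _
  unfold Spec_multiplicar_digito_por_lista multiplicar_digito_por_lista multiplicar_digito_por_lista_alt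
  by_cases h0 : digito = 0
  · simp [h0]
  · simp only [h0, if_false]
    rw [pv_loop_eq_foldr
      (fun d s => (PySem.Int.mod (digito * d + s.2) 10 :: s.1,
                   PySem.Int.floordiv (digito * d + s.2) 10)) lista,
      pvA_foldr digito lista, pvB_loop]
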